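-- pv_equiv track=rewrite | github.com/DiggsPapu/TeoriaComputacion | CFG.py | es_alcanzable
-- ===== SOURCE A (Python) =====
-- def es_alcanzable(gramatica:dict, no_terminales:list, no_terminal:str, no_terminal_inicial:str, producciones_exploradas:list):
--     producciones_exploradas = list(set(producciones_exploradas))
--     # Si el no terminal inicial no esta en las producciones exploradas entonces este no terminal y sus producciones no han sido explorados
--     if no_terminal_inicial not in producciones_exploradas:
--         producciones_exploradas.append(no_terminal_inicial)
--         try:
--             for production in gramatica[no_terminal_inicial]:
--                 elementos = production.split(" ")
--                 if no_terminal in elementos: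
--                     return True
--                 else:
--                     for elemento in elementos:
--                         if elemento in no_terminales:
--                             if es_alcanzable(gramatica, no_terminales, no_terminal, elemento,producciones_exploradas):
--                                 return True
--         except:
--             # Significa que ni siquiera tiene producciones asignadas, por ende es inalcanzable
--             return False
--     return False
-- ===== SOURCE B (Python) =====
-- def es_alcanzable(gramatica: dict, no_terminales: list, no_terminal: str, no_terminal_inicial: str, producciones_exploradas: list):
--     # Worklist BFS with one global visited set instead of A's recursive
--     # per-path exploration: each non-terminal is expanded at most once.
--     bloqueados = set(producciones_exploradas)
--     if no_terminal_inicial in bloqueados: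
--         return False
--     alcanzados = {no_terminal_inicial}
--     frontera = [no_terminal_inicial]
--     while frontera:
--         nuevos = []
--         for v in frontera:
--             for produccion in gramatica.get(v, []):
--                 elementos = produccion.split(" ")
--                 if no_terminal in elementos:
--                     return True
--                 for t in elementos:
--                     if t in no_terminales and t not in bloqueados and t not in alcanzados:
--                         alcanzados.add(t)
--                         nuevos.append(t)
--         frontera = nuevos
--     return False
-- ===== Notes on version B (the rewrite author's own statement) =====
-- stated objective: alternative
-- what changed: Replaces A's recursive depth-first search, which copies and regrows the explored set per path and can re-explore the same non-terminal along different paths, with a single worklist BFS over the non-terminal graph using one global visited set, expanding each non-terminal at most once.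
import Mathlib
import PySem

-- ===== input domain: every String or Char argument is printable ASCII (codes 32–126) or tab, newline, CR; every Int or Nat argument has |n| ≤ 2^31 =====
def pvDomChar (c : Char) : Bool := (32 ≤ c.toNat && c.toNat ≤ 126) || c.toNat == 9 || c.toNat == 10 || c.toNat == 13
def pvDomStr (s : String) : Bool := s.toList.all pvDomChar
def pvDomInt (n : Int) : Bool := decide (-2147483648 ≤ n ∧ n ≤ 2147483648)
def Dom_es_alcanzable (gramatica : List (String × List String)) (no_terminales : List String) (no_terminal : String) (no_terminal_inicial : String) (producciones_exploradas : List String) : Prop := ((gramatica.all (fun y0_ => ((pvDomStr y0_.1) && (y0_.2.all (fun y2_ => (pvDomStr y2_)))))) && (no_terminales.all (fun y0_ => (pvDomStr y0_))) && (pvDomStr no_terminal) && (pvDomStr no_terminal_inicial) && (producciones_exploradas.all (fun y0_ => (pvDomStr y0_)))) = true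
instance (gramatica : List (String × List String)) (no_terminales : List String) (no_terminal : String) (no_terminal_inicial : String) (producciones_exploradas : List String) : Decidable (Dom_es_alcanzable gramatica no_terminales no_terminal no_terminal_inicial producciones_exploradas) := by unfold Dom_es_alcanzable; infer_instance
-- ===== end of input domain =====

-- B replaces A's recursive per-path exploration (a fresh copy of the explored set per branch,
-- so nodes can be re-explored) by one worklist BFS with a single global visited set, expanding
-- each non-terminal at most once (objective: alternative).

-- measure helpers used by the ports' termination arguments
def pvCnt (nts expl : List String) : Nat := (nts.filter (fun z => decide (z ∉ expl))).length

theorem pv_filter_le (p q : String → Bool) : ∀ (l : List String), (∀ x ∈ l, p x = true → q x = true) → (l.filter p).length ≤ (l.filter q).length := by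
  intro l h
  induction l with
  | nil => simp
  | cons a l ih =>
    have ha := h a (by simp)
    have ih' := ih (fun x hx => h x (by simp [hx]))
    by_cases hp : p a = true <;> by_cases hq : q a = true <;>
      simp [hp, hq] at * <;> omega

theorem pv_filter_lt (p q : String → Bool) (x : String) : ∀ (l : List String), x ∈ l → p x = false → q x = true → (∀ y ∈ l, p y = true → q y = true) → (l.filter p).length < (l.filter q).length := by
  intro l hx hp hq h
  induction l with
  | nil => simp at hx
  | cons a l ih =>
    rcases List.mem_cons.mp hx with rfl | hx'
    · have hle := pv_filter_le p q l (fun y hy => h y (by simp [hy]))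
      simp [hp, hq]; omega
    · have ih' := ih hx' (fun y hy => h y (by simp [hy]))
      by_cases hpa : p a = true
      · have hqa := h a (by simp) hpa
        simp [hpa, hqa]; omega
      · simp at hpa
        by_cases hqa : q a = true <;> simp [hpa, hqa] <;> omega

theorem pvCnt_mono (nts e1 e2 : List String) (h : ∀ x, x ∈ e1 → x ∈ e2) : pvCnt nts e2 ≤ pvCnt nts e1 := by
  apply pv_filter_le
  intro x _ hx
  simp at hx ⊢
  intro hx1
  exact absurd (h x hx1) hx

theorem pvCnt_strict (nts e1 e2 : List String) (x : String) (hx : x ∈ nts) (h1 : x ∉ e1) (h2 : x ∈ e2) (h : ∀ y, y ∈ e1 → y ∈ e2) : pvCnt nts e2 < pvCnt nts e1 := by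
  apply pv_filter_lt _ _ x nts hx (by simp [h2]) (by simp [h1])
  intro y _ hy
  simp at hy ⊢
  intro hy1
  exact absurd (h y hy1) hy

theorem pvMeasA_lt (nts expl : List String) (ini : String) (h1 : ini ∉ expl) :
    3 * pvCnt nts (PySem.Set.ofList expl ++ [ini]) + 3 < 3 * pvCnt nts expl + (if ini ∈ nts then 2 else 4) := by
  have hsub : ∀ y, y ∈ expl → y ∈ PySem.Set.ofList expl ++ [ini] := by
    intro y hy; simp [PySem.Set.mem_ofList, hy]
  by_cases hini : ini ∈ nts
  · have := pvCnt_strict nts expl (PySem.Set.ofList expl ++ [ini]) ini hini h1 (by simp) hsub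
    simp [hini]; omega
  · have := pvCnt_mono nts expl (PySem.Set.ofList expl ++ [ini]) hsub
    simp [hini]; omega

-- ===== PORT A =====
mutual
def esProds (g : List (String × List String)) (nts : List String) (nt : String) (expl3 : List String) : List String → Bool
  | [] => false
  | p :: rest =>
    let el := (PySem.Str.split? p " ").getD []
    if nt ∈ el then true
    else if esElems g nts nt expl3 el then true
    else esProds g nts nt expl3 rest
  termination_by l => (3 * pvCnt nts expl3 + 3, 1, l.length)
  decreasing_by
    all_goals first
      | exact Prod.Lex.right _ (Prod.Lex.right _ (by simp))
      | exact Prod.Lex.right _ (Prod.Lex.left _ _ (by omega))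

def esElems (g : List (String × List String)) (nts : List String) (nt : String) (expl3 : List String) : List String → Bool
  | [] => false
  | e :: rest =>
    if h2 : e ∈ nts then
      if es_alcanzable g nts nt e expl3 then true else esElems g nts nt expl3 rest
    else esElems g nts nt expl3 rest
  termination_by l => (3 * pvCnt nts expl3 + 3, 0, l.length)
  decreasing_by
    all_goals first
      | exact Prod.Lex.right _ (Prod.Lex.right _ (by simp))
      | exact Prod.Lex.left _ _ (by rw [if_pos h2]; omega)

def es_alcanzable (gramatica : List (String × List String)) (no_terminales : List String) (no_terminal : String) (no_terminal_inicial : String) (producciones_exploradas : List String) : Bool :=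
  if h1 : no_terminal_inicial ∈ PySem.Set.ofList producciones_exploradas then false
  else
    match PySem.Dict.get? (PySem.Dict.mk gramatica) no_terminal_inicial with
    | none => false
    | some prods => esProds gramatica no_terminales no_terminal (PySem.Set.ofList producciones_exploradas ++ [no_terminal_inicial]) prods
  termination_by (3 * pvCnt no_terminales producciones_exploradas + (if no_terminal_inicial ∈ no_terminales then 2 else 4), 2, 0)
  decreasing_by
    exact Prod.Lex.left _ _ (by
      have := pvMeasA_lt nts producciones_exploradas no_terminal_inicial (by simpa [PySem.Set.mem_ofList] using h1)
      omega)
end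

-- ===== PORT B =====
def altCollect (nts bloq : List String) : List String → List String → List String → (List String × List String)
  | [], alc, nuevos => (alc, nuevos)
  | t :: rest, alc, nuevos =>
    if t ∈ nts ∧ t ∉ bloq ∧ t ∉ alc then altCollect nts bloq rest (alc ++ [t]) (nuevos ++ [t])
    else altCollect nts bloq rest alc nuevos

def altScanProds (nts bloq : List String) (nt : String) : List String → List String → List String → Option (List String × List String)
  | [], alc, nuevos => some (alc, nuevos)
  | p :: rest, alc, nuevos =>
    if nt ∈ (PySem.Str.split? p " ").getD [] then none
    else
      match altCollect nts bloq ((PySem.Str.split? p " ").getD []) alc nuevos with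
      | (alc', nuevos') => altScanProds nts bloq nt rest alc' nuevos'

def altScanFront (g : List (String × List String)) (nts bloq : List String) (nt : String) : List String → List String → List String → Option (List String × List String)
  | [], alc, nuevos => some (alc, nuevos)
  | v :: vs, alc, nuevos =>
    match altScanProds nts bloq nt ((PySem.Dict.get? (PySem.Dict.mk g) v).getD []) alc nuevos with
    | none => none
    | some (alc', nuevos') => altScanFront g nts bloq nt vs alc' nuevos'

-- minimal facts about the scan, cited by altLoop's decreasing_by
theorem altCollect_adds (nts bloq : List String) : ∀ (el alc nuevos : List String), ∃ add, altCollect nts bloq el alc nuevos = (alc ++ add, nuevos ++ add) ∧ ∀ t ∈ add, t ∈ nts ∧ t ∉ bloq ∧ t ∉ alc := by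
  intro el
  induction el with
  | nil => intro alc nuevos; exact ⟨[], by simp [altCollect]⟩
  | cons t rest ih =>
    intro alc nuevos
    by_cases h : t ∈ nts ∧ t ∉ bloq ∧ t ∉ alc
    · obtain ⟨add, heq, hprop⟩ := ih (alc ++ [t]) (nuevos ++ [t])
      refine ⟨t :: add, ?_, ?_⟩
      · simp [altCollect, h, heq]
      · intro x hx
        rcases List.mem_cons.mp hx with rfl | hx'
        · exact h
        · have := hprop x hx'
          refine ⟨this.1, this.2.1, fun hc => this.2.2 (by simp [hc])⟩
    · obtain ⟨add, heq, hprop⟩ := ih alc nuevos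
      exact ⟨add, by simp [altCollect, h, heq], hprop⟩

theorem altScanProds_adds (nts bloq : List String) (nt : String) : ∀ (prods alc nuevos r : _), altScanProds nts bloq nt prods alc nuevos = some r → ∃ add, r = (alc ++ add, nuevos ++ add) ∧ ∀ t ∈ add, t ∈ nts ∧ t ∉ bloq ∧ t ∉ alc := by
  intro prods
  induction prods with
  | nil => intro alc nuevos r h; exact ⟨[], by simp [altScanProds] at h; simp [← h]⟩
  | cons p rest ih =>
    intro alc nuevos r h
    simp only [altScanProds] at h
    split at h
    · exact absurd h (by simp)
    · obtain ⟨add1, hc1, hp1⟩ := altCollect_adds nts bloq ((PySem.Str.split? p " ").getD []) alc nuevos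
      rw [hc1] at h
      obtain ⟨add2, hr, hp2⟩ := ih _ _ _ h
      refine ⟨add1 ++ add2, by simp [hr], ?_⟩
      intro t ht
      rcases List.mem_append.mp ht with h' | h'
      · exact hp1 t h'
      · have := hp2 t h'
        refine ⟨this.1, this.2.1, fun hc => this.2.2 (by simp [hc])⟩

theorem altScanFront_adds (g : List (String × List String)) (nts bloq : List String) (nt : String) : ∀ (vs alc nuevos r : _), altScanFront g nts bloq nt vs alc nuevos = some r → ∃ add, r = (alc ++ add, nuevos ++ add) ∧ ∀ t ∈ add, t ∈ nts ∧ t ∉ bloq ∧ t ∉ alc := by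
  intro vs
  induction vs with
  | nil => intro alc nuevos r h; exact ⟨[], by simp [altScanFront] at h; simp [← h]⟩
  | cons v rest ih =>
    intro alc nuevos r h
    simp only [altScanFront] at h
    rcases hs : altScanProds nts bloq nt ((PySem.Dict.get? (PySem.Dict.mk g) v).getD []) alc nuevos with _ | ⟨alc', nuevos'⟩
    · rw [hs] at h; exact absurd h (by simp)
    · rw [hs] at h
      obtain ⟨add1, hr1, hp1⟩ := altScanProds_adds nts bloq nt _ _ _ _ hs
      simp only [Prod.mk.injEq] at hr1
      obtain ⟨rfl, rfl⟩ := hr1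
      obtain ⟨add2, hr, hp2⟩ := ih _ _ _ h
      refine ⟨add1 ++ add2, by simp [hr], ?_⟩
      intro t ht
      rcases List.mem_append.mp ht with h' | h'
      · exact hp1 t h'
      · have := hp2 t h'
        refine ⟨this.1, this.2.1, fun hc => this.2.2 (by simp [hc])⟩

def altLoop (g : List (String × List String)) (nts bloq : List String) (nt : String) (alc front : List String) : Bool :=
  match front with
  | [] => false
  | _ :: _ =>
    match h : altScanFront g nts bloq nt front alc [] with
    | none => true
    | some (alc', nuevos) => altLoop g nts bloq nt alc' nuevos
  termination_by 2 * pvCnt nts alc + (if front.isEmpty then 0 else 1)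
  decreasing_by
    all_goals
    obtain ⟨add, hr, hp⟩ := altScanFront_adds g nts bloq nt _ _ _ _ h
    simp only [Prod.mk.injEq, List.nil_append] at hr
    obtain ⟨h1, h2⟩ := hr
    subst h1; subst h2
    cases nuevos with
    | nil => simp
    | cons a add' =>
      have ha := hp a (by simp)
      have hlt : pvCnt nts (alc ++ a :: add') < pvCnt nts alc := by
        apply pvCnt_strict nts alc _ a ha.1 ha.2.2
        · simp
        · intro y hy; simp [hy]
      simp
      omega

def es_alcanzable_alt (gramatica : List (String × List String)) (no_terminales : List String) (no_terminal : String) (no_terminal_inicial : String) (producciones_exploradas : List String) : Bool :=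
  if no_terminal_inicial ∈ PySem.Set.ofList producciones_exploradas then false
  else altLoop gramatica no_terminales (PySem.Set.ofList producciones_exploradas) no_terminal [no_terminal_inicial] [no_terminal_inicial]

-- ===== PRECONDITION & SPEC =====
def Spec_es_alcanzable (gramatica : List (String × List String)) (no_terminales : List String) (no_terminal : String) (no_terminal_inicial : String) (producciones_exploradas : List String) (out : Bool) : Prop := out = es_alcanzable_alt gramatica no_terminales no_terminal no_terminal_inicial producciones_exploradas
instance (gramatica : List (String × List String)) (no_terminales : List String) (no_terminal : String) (no_terminal_inicial : String) (producciones_exploradas : List String) (out : Bool) : Decidable (Spec_es_alcanzable gramatica no_terminales no_terminal no_terminal_inicial producciones_exploradas out) := by unfold Spec_es_alcanzable; infer_instance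

-- ===== CLAIM (what is proved, stated in full; the proofs are below) =====
def Claim_equal_es_alcanzable : Prop := ∀ (gramatica : List (String × List String)) (no_terminales : List String) (no_terminal : String) (no_terminal_inicial : String) (producciones_exploradas : List String), Dom_es_alcanzable gramatica no_terminales no_terminal no_terminal_inicial producciones_exploradas → Spec_es_alcanzable gramatica no_terminales no_terminal no_terminal_inicial producciones_exploradas (es_alcanzable gramatica no_terminales no_terminal no_terminal_inicial producciones_exploradas)

-- ===== LEMMAS AND PROOFS =====

-- reachability spec shared by both correctness proofs: nt occurs (as a token) in a
-- production of a node reachable from v through nts-tokens, avoiding the set S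
inductive pvReach (g : List (String × List String)) (nts : List String) (nt : String) (S : List String) : String → Prop where
  | found (v p : String) (hv : v ∉ S) (hp : p ∈ (PySem.Dict.get? (PySem.Dict.mk g) v).getD []) (hw : nt ∈ (PySem.Str.split? p " ").getD []) : pvReach g nts nt S v
  | step (v t p : String) (hv : v ∉ S) (ht : t ∈ nts) (hp : p ∈ (PySem.Dict.get? (PySem.Dict.mk g) v).getD []) (hnw : nt ∉ (PySem.Str.split? p " ").getD []) (htp : t ∈ (PySem.Str.split? p " ").getD []) (hr : pvReach g nts nt S t) : pvReach g nts nt S v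

theorem pvReach_not_mem (g : List (String × List String)) (nts : List String) (nt : String) (S : List String) (v : String) (h : pvReach g nts nt S v) : v ∉ S := by
  cases h with
  | found _ _ hv _ _ => exact hv
  | step _ _ _ hv _ _ _ _ _ => exact hv

theorem pvReach_mono (g : List (String × List String)) (nts : List String) (nt : String) (S S' : List String) (hss : ∀ x, x ∈ S → x ∈ S') (v : String) (h : pvReach g nts nt S' v) : pvReach g nts nt S v := by
  induction h with
  | found v p hv hp hw => exact .found v p (fun hc => hv (hss v hc)) hp hw
  | step v t p hv ht hp hnw htp _ ih => exact .step v t p (fun hc => hv (hss v hc)) ht hp hnw htp ih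

-- the cut lemma: a witness path for v either also avoids w, or the exploration from w
-- itself succeeds (with w now avoided)
theorem pvReach_cut (g : List (String × List String)) (nts : List String) (nt : String) (S : List String) (v : String) (h : pvReach g nts nt S v) : ∀ w : String, pvReach g nts nt (w :: S) v ∨ (w ∉ S ∧ ((∃ p ∈ (PySem.Dict.get? (PySem.Dict.mk g) w).getD [], nt ∈ (PySem.Str.split? p " ").getD []) ∨ ∃ t p, t ∈ nts ∧ p ∈ (PySem.Dict.get? (PySem.Dict.mk g) w).getD [] ∧ nt ∉ (PySem.Str.split? p " ").getD [] ∧ t ∈ (PySem.Str.split? p " ").getD [] ∧ pvReach g nts nt (w :: S) t)) := by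
  induction h with
  | found v p hv hp hw =>
    intro w
    by_cases hvw : v = w
    · subst hvw; exact Or.inr ⟨hv, Or.inl ⟨p, hp, hw⟩⟩
    · exact Or.inl (.found v p (by simp [hvw, hv]) hp hw)
  | step v t p hv ht hp hnw htp hr ih =>
    intro w
    rcases ih w with h' | h'
    · by_cases hvw : v = w
      · subst hvw; exact Or.inr ⟨hv, Or.inr ⟨t, p, ht, hp, hnw, htp, h'⟩⟩
      · exact Or.inl (.step v t p (by simp [hvw, hv]) ht hp hnw htp h')
    · exact Or.inr h'

-- characterizations of A's two inner loops
theorem esElems_true_iff (g : List (String × List String)) (nts : List String) (nt : String) (expl3 : List String) : ∀ el : List String, (esElems g nts nt expl3 el = true ↔ ∃ e ∈ el, e ∈ nts ∧ es_alcanzable g nts nt e expl3 = true) := by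
  intro el
  induction el with
  | nil => simp [esElems]
  | cons e rest ih =>
    by_cases he : e ∈ nts <;> by_cases hes : es_alcanzable g nts nt e expl3 = true <;>
      simp [esElems, he, hes, ih]

theorem esProds_true_iff (g : List (String × List String)) (nts : List String) (nt : String) (expl3 : List String) : ∀ prods : List String, (esProds g nts nt expl3 prods = true ↔ ∃ p ∈ prods, nt ∈ (PySem.Str.split? p " ").getD [] ∨ esElems g nts nt expl3 ((PySem.Str.split? p " ").getD []) = true) := by
  intro prods
  induction prods with
  | nil => simp [esProds]
  | cons p rest ih =>
    by_cases hw : nt ∈ (PySem.Str.split? p " ").getD [] <;>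
      by_cases he : esElems g nts nt expl3 ((PySem.Str.split? p " ").getD []) = true <;>
      simp [esProds, hw, he, ih]

-- A computes pvReach: both directions at once, by strong induction on the measure
theorem esA_true_iff (g : List (String × List String)) (nts : List String) (nt : String) : ∀ (n : Nat) (expl : List String) (ini : String), 3 * pvCnt nts expl + (if ini ∈ nts then 2 else 4) ≤ n → (es_alcanzable g nts nt ini expl = true ↔ pvReach g nts nt expl ini) := by
  intro n
  induction n using Nat.strong_induction_on with
  | _ n ih =>
    intro expl ini hle
    by_cases h1 : ini ∈ PySem.Set.ofList expl
    · have h1' : ini ∈ expl := (PySem.Set.mem_ofList _ _).mp h1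
      rw [es_alcanzable]
      simp [h1]
      intro hr
      exact pvReach_not_mem _ _ _ _ _ hr h1'
    · have h1' : ini ∉ expl := fun hc => h1 ((PySem.Set.mem_ofList _ _).mpr hc)
      rw [es_alcanzable]
      simp only [h1, dite_false]
      rcases hg : PySem.Dict.get? (PySem.Dict.mk g) ini with _ | prods
      · simp
        intro hr
        cases hr with
        | found _ p _ hp _ => rw [hg] at hp; simp at hp
        | step _ t p _ _ hp _ _ _ => rw [hg] at hp; simp at hp
      · have hmeas := pvMeasA_lt nts expl ini h1'
        have ihchild : ∀ e, e ∈ nts → (es_alcanzable g nts nt e (PySem.Set.ofList expl ++ [ini]) = true ↔ pvReach g nts nt (PySem.Set.ofList expl ++ [ini]) e) := by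
          intro e he
          have hm : 3 * pvCnt nts (PySem.Set.ofList expl ++ [ini]) + (if e ∈ nts then 2 else 4) < n := by
            simp only [he, if_true] at *
            omega
          exact ih _ hm (PySem.Set.ofList expl ++ [ini]) e (le_refl _)
        constructor
        · -- A true → Reach
          intro htrue
          have := (esProds_true_iff g nts nt _ prods).mp htrue
          obtain ⟨p, hp, hcase⟩ := this
          by_cases hw : nt ∈ (PySem.Str.split? p " ").getD []
          · exact .found ini p h1' (by rw [hg]; simpa) hw
          · rcases hcase with hw' | hel
            · exact absurd hw' hw
            · obtain ⟨e, hepl, hent, hes⟩ := (esElems_true_iff g nts nt _ _).mp hel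
              have hre : pvReach g nts nt (PySem.Set.ofList expl ++ [ini]) e := (ihchild e hent).mp hes
              have hre' : pvReach g nts nt expl e :=
                pvReach_mono g nts nt expl _ (fun x hx => by simp [PySem.Set.mem_ofList, hx]) e hre
              exact .step ini e p h1' hent (by rw [hg]; simpa) hw hepl hre'
        · -- Reach → A true
          intro hr
          rw [esProds_true_iff]
          cases hr with
          | found _ p hv hp hw =>
            rw [hg] at hp; simp at hp
            exact ⟨p, hp, Or.inl hw⟩
          | step _ t p hv ht hp hnw htp hsub =>
            rw [hg] at hp; simp at hp
            rcases pvReach_cut g nts nt expl t hsub ini with hcut | ⟨_, hcut⟩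
            · -- path avoids ini too
              have hre3 : pvReach g nts nt (PySem.Set.ofList expl ++ [ini]) t :=
                pvReach_mono g nts nt _ (ini :: expl) (fun x hx => by
                  simp [PySem.Set.mem_ofList] at hx
                  simp only [List.mem_cons]
                  tauto) t hcut
              have hes := (ihchild t ht).mpr hre3
              exact ⟨p, hp, Or.inr ((esElems_true_iff g nts nt _ _).mpr ⟨t, htp, ht, hes⟩)⟩
            · rcases hcut with ⟨p', hp', hw'⟩ | ⟨t', p', ht', hp', hnw', htp', hr'⟩
              · rw [hg] at hp'; simp at hp'
                exact ⟨p', hp', Or.inl hw'⟩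
              · rw [hg] at hp'; simp at hp'
                have hre3 : pvReach g nts nt (PySem.Set.ofList expl ++ [ini]) t' :=
                  pvReach_mono g nts nt _ (ini :: expl) (fun x hx => by
                    simp [PySem.Set.mem_ofList] at hx
                    simp only [List.mem_cons]
                    tauto) t' hr'
                have hes := (ihchild t' ht').mpr hre3
                exact ⟨p', hp', Or.inr ((esElems_true_iff g nts nt _ _).mpr ⟨t', htp', ht', hes⟩)⟩

-- B-side abstract notions
def pvWin (g : List (String × List String)) (nt v : String) : Prop := ∃ p ∈ (PySem.Dict.get? (PySem.Dict.mk g) v).getD [], nt ∈ (PySem.Str.split? p " ").getD []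

def pvEdge (g : List (String × List String)) (nts : List String) (nt : String) (bloq : List String) (a b : String) : Prop := b ∈ nts ∧ b ∉ bloq ∧ ∃ p ∈ (PySem.Dict.get? (PySem.Dict.mk g) a).getD [], nt ∉ (PySem.Str.split? p " ").getD [] ∧ b ∈ (PySem.Str.split? p " ").getD []

def pvScanned (g : List (String × List String)) (nts : List String) (nt : String) (bloq R : List String) (v : String) : Prop := (∀ p ∈ (PySem.Dict.get? (PySem.Dict.mk g) v).getD [], nt ∉ (PySem.Str.split? p " ").getD []) ∧ (∀ p ∈ (PySem.Dict.get? (PySem.Dict.mk g) v).getD [], ∀ t ∈ (PySem.Str.split? p " ").getD [], t ∈ nts → t ∉ bloq → t ∈ R)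

theorem pvScanned_mono (g : List (String × List String)) (nts : List String) (nt : String) (bloq R R' : List String) (hsub : ∀ x, x ∈ R → x ∈ R') (v : String) (h : pvScanned g nts nt bloq R v) : pvScanned g nts nt bloq R' v :=
  ⟨h.1, fun p hp t ht h1 h2 => hsub t (h.2 p hp t ht h1 h2)⟩

theorem pvReach_of_rtg (g : List (String × List String)) (nts : List String) (nt : String) (bloq : List String) (v w : String) (hrtg : Relation.ReflTransGen (pvEdge g nts nt bloq) v w) : v ∉ bloq → pvWin g nt w → pvReach g nts nt bloq v := by
  induction hrtg using Relation.ReflTransGen.head_induction_on with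
  | refl =>
    intro hv ⟨p, hp, hw⟩
    exact .found w p hv hp hw
  | head hedge _ ih =>
    rename_i a c _
    intro ha hwin
    obtain ⟨hc1, hc2, p, hp, hnw, hcp⟩ := hedge
    exact .step a c p ha hc1 hp hnw hcp (ih hc2 hwin)

theorem pvReach_closed (g : List (String × List String)) (nts : List String) (nt : String) (bloq R : List String) (hclosed : ∀ w ∈ R, pvScanned g nts nt bloq R w) : ∀ v, pvReach g nts nt bloq v → v ∈ R → False := by
  intro v h
  induction h with
  | found v p hv hp hw =>
    intro hvR
    exact (hclosed v hvR).1 p hp hw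
  | step v t p hv ht hp hnw htp hr ih =>
    intro hvR
    have htb := pvReach_not_mem _ _ _ _ _ hr
    exact ih ((hclosed v hvR).2 p hp t htp ht htb)

-- full specs of B's scan helpers
theorem altCollect_spec (nts bloq : List String) : ∀ (el alc nuevos : List String), ∃ add, altCollect nts bloq el alc nuevos = (alc ++ add, nuevos ++ add) ∧ (∀ t ∈ add, t ∈ nts ∧ t ∉ bloq ∧ t ∉ alc ∧ t ∈ el) ∧ (∀ t ∈ el, t ∈ nts → t ∉ bloq → t ∈ alc ++ add) := by
  intro el
  induction el with
  | nil => intro alc nuevos; exact ⟨[], by simp [altCollect]⟩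
  | cons t rest ih =>
    intro alc nuevos
    by_cases h : t ∈ nts ∧ t ∉ bloq ∧ t ∉ alc
    · obtain ⟨add, heq, hprop, hcov⟩ := ih (alc ++ [t]) (nuevos ++ [t])
      refine ⟨t :: add, by simp [altCollect, h, heq], ?_, ?_⟩
      · intro x hx
        rcases List.mem_cons.mp hx with rfl | hx'
        · exact ⟨h.1, h.2.1, h.2.2, by simp⟩
        · have := hprop x hx'
          exact ⟨this.1, this.2.1, fun hc => this.2.2.1 (by simp [hc]), by simp [this.2.2.2]⟩
      · intro x hx hx1 hx2
        rcases List.mem_cons.mp hx with rfl | hx'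
        · simp
        · have := hcov x hx' hx1 hx2
          simp at this ⊢; tauto
    · obtain ⟨add, heq, hprop, hcov⟩ := ih alc nuevos
      refine ⟨add, by simp [altCollect, h, heq], ?_, ?_⟩
      · intro x hx
        have := hprop x hx
        exact ⟨this.1, this.2.1, this.2.2.1, by simp [this.2.2.2]⟩
      · intro x hx hx1 hx2
        rcases List.mem_cons.mp hx with rfl | hx'
        · -- t itself: failed the guard, so t ∈ alc
          have : x ∈ alc := by tauto
          simp [this]
        · exact hcov x hx' hx1 hx2

theorem altScanProds_none_spec (nts bloq : List String) (nt : String) : ∀ (prods alc nuevos : _), altScanProds nts bloq nt prods alc nuevos = none → ∃ p ∈ prods, nt ∈ (PySem.Str.split? p " ").getD [] := by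
  intro prods
  induction prods with
  | nil => intro alc nuevos h; simp [altScanProds] at h
  | cons p rest ih =>
    intro alc nuevos h
    simp only [altScanProds] at h
    split at h
    · exact ⟨p, by simp, by assumption⟩
    · rcases hc : altCollect nts bloq ((PySem.Str.split? p " ").getD []) alc nuevos with ⟨alc', nuevos'⟩
      rw [hc] at h
      obtain ⟨p', hp', hw'⟩ := ih _ _ h
      exact ⟨p', by simp [hp'], hw'⟩

theorem altScanProds_some_spec (nts bloq : List String) (nt : String) : ∀ (prods alc nuevos r : _), altScanProds nts bloq nt prods alc nuevos = some r → ∃ add, r = (alc ++ add, nuevos ++ add) ∧ (∀ t ∈ add, t ∈ nts ∧ t ∉ bloq ∧ t ∉ alc ∧ ∃ p ∈ prods, nt ∉ (PySem.Str.split? p " ").getD [] ∧ t ∈ (PySem.Str.split? p " ").getD []) ∧ (∀ p ∈ prods, nt ∉ (PySem.Str.split? p " ").getD []) ∧ (∀ p ∈ prods, ∀ t ∈ (PySem.Str.split? p " ").getD [], t ∈ nts → t ∉ bloq → t ∈ alc ++ add) := by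
  intro prods
  induction prods with
  | nil =>
    intro alc nuevos r h
    simp [altScanProds] at h
    exact ⟨[], by simp [← h], by simp, by simp, by simp⟩
  | cons p rest ih =>
    intro alc nuevos r h
    simp only [altScanProds] at h
    split at h
    · exact absurd h (by simp)
    · rename_i hnw
      obtain ⟨add1, hc1, hp1, hcov1⟩ := altCollect_spec nts bloq ((PySem.Str.split? p " ").getD []) alc nuevos
      rw [hc1] at h
      obtain ⟨add2, hr, hp2, hnw2, hcov2⟩ := ih _ _ _ h
      refine ⟨add1 ++ add2, by simp [hr], ?_, ?_, ?_⟩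
      · intro t ht
        rcases List.mem_append.mp ht with h' | h'
        · have := hp1 t h'
          exact ⟨this.1, this.2.1, this.2.2.1, p, by simp, hnw, this.2.2.2⟩
        · have := hp2 t h'
          obtain ⟨p', hp', hx⟩ := this.2.2.2
          exact ⟨this.1, this.2.1, fun hc => this.2.2.1 (by simp [hc]), p', by simp [hp'], hx⟩
      · intro p' hp'
        rcases List.mem_cons.mp hp' with rfl | h'
        · exact hnw
        · exact hnw2 p' h'
      · intro p' hp' t ht h1 h2
        rcases List.mem_cons.mp hp' with rfl | h'
        · have := hcov1 t ht h1 h2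
          simp at this ⊢; tauto
        · have := hcov2 p' h' t ht h1 h2
          simp at this ⊢; tauto

theorem altScanFront_none_spec (g : List (String × List String)) (nts bloq : List String) (nt : String) : ∀ (vs alc nuevos : _), altScanFront g nts bloq nt vs alc nuevos = none → ∃ v ∈ vs, pvWin g nt v := by
  intro vs
  induction vs with
  | nil => intro alc nuevos h; simp [altScanFront] at h
  | cons v rest ih =>
    intro alc nuevos h
    simp only [altScanFront] at h
    rcases hs : altScanProds nts bloq nt ((PySem.Dict.get? (PySem.Dict.mk g) v).getD []) alc nuevos with _ | ⟨alc', nuevos'⟩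
    · obtain ⟨p, hp, hw⟩ := altScanProds_none_spec nts bloq nt _ _ _ hs
      exact ⟨v, by simp, p, hp, hw⟩
    · rw [hs] at h
      obtain ⟨v', hv', hw'⟩ := ih _ _ h
      exact ⟨v', by simp [hv'], hw'⟩

theorem altScanFront_some_spec (g : List (String × List String)) (nts bloq : List String) (nt : String) : ∀ (vs alc nuevos r : _), altScanFront g nts bloq nt vs alc nuevos = some r → ∃ add, r = (alc ++ add, nuevos ++ add) ∧ (∀ t ∈ add, t ∈ nts ∧ t ∉ bloq ∧ t ∉ alc ∧ ∃ v ∈ vs, ∃ p ∈ (PySem.Dict.get? (PySem.Dict.mk g) v).getD [], nt ∉ (PySem.Str.split? p " ").getD [] ∧ t ∈ (PySem.Str.split? p " ").getD []) ∧ (∀ v ∈ vs, pvScanned g nts nt bloq (alc ++ add) v) := by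
  intro vs
  induction vs with
  | nil =>
    intro alc nuevos r h
    simp [altScanFront] at h
    exact ⟨[], by simp [← h], by simp, by simp⟩
  | cons v rest ih =>
    intro alc nuevos r h
    simp only [altScanFront] at h
    rcases hs : altScanProds nts bloq nt ((PySem.Dict.get? (PySem.Dict.mk g) v).getD []) alc nuevos with _ | ⟨alc', nuevos'⟩
    · rw [hs] at h; exact absurd h (by simp)
    · rw [hs] at h
      obtain ⟨add1, hr1, hp1, hnw1, hcov1⟩ := altScanProds_some_spec nts bloq nt _ _ _ _ hs
      simp only [Prod.mk.injEq] at hr1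
      obtain ⟨rfl, rfl⟩ := hr1
      obtain ⟨add2, hr, hp2, hsc2⟩ := ih _ _ _ h
      refine ⟨add1 ++ add2, by simp [hr], ?_, ?_⟩
      · intro t ht
        rcases List.mem_append.mp ht with h' | h'
        · have := hp1 t h'
          obtain ⟨p, hp, hx⟩ := this.2.2.2
          exact ⟨this.1, this.2.1, this.2.2.1, v, by simp, p, hp, hx⟩
        · have := hp2 t h'
          obtain ⟨v', hv', hx⟩ := this.2.2.2
          exact ⟨this.1, this.2.1, fun hc => this.2.2.1 (by simp [hc]), v', by simp [hv'], hx⟩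
      · intro v' hv'
        rcases List.mem_cons.mp hv' with rfl | h'
        · refine ⟨hnw1, ?_⟩
          intro p hp t ht h1 h2
          have := hcov1 p hp t ht h1 h2
          simp at this ⊢; tauto
        · have := hsc2 v' h'
          exact pvScanned_mono g nts nt bloq _ _ (by intro x hx; simp at hx ⊢; tauto) v' this

-- the BFS loop computes pvReach, by strong induction on its measure
theorem altLoop_iff (g : List (String × List String)) (nts bloq : List String) (nt ini : String) : ∀ (n : Nat) (alc front : List String), 2 * pvCnt nts alc + (if front.isEmpty then 0 else 1) ≤ n → ini ∉ bloq → ini ∈ alc → (∀ v ∈ alc, Relation.ReflTransGen (pvEdge g nts nt bloq) ini v) → (∀ v ∈ front, v ∈ alc) → (∀ v ∈ alc, v ∉ front → pvScanned g nts nt bloq alc v) → (altLoop g nts bloq nt alc front = true ↔ pvReach g nts nt bloq ini) := by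
  intro n
  induction n using Nat.strong_induction_on with
  | _ n ih =>
    intro alc front hle hib hia hrtg hfa hsc
    match front with
    | [] =>
      rw [altLoop]
      simp
      intro hr
      exact pvReach_closed g nts nt bloq alc (fun w hw => hsc w hw (by simp)) ini hr hia
    | v0 :: vs =>
      rw [altLoop]
      rcases hs : altScanFront g nts bloq nt (v0 :: vs) alc [] with _ | ⟨alc', nuevos⟩
      · simp
        obtain ⟨w, hw, hwin⟩ := altScanFront_none_spec g nts bloq nt _ _ _ hs
        exact pvReach_of_rtg g nts nt bloq ini w (hrtg w (hfa w hw)) hib hwin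
      · simp only []
        obtain ⟨add_, hr, hp, hscan⟩ := altScanFront_some_spec g nts bloq nt _ _ _ _ hs
        simp only [Prod.mk.injEq, List.nil_append] at hr
        obtain ⟨rfl, rfl⟩ := hr
        have hasub : ∀ x, x ∈ alc → x ∈ alc ++ nuevos := by intro x hx; simp [hx]
        have hrtg' : ∀ v ∈ alc ++ nuevos, Relation.ReflTransGen (pvEdge g nts nt bloq) ini v := by
          intro v hv
          rcases List.mem_append.mp hv with h' | h'
          · exact hrtg v h'
          · obtain ⟨h1, h2, _, w, hw, p, hp', hnw, htp⟩ := hp v h'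
            exact Relation.ReflTransGen.tail (hrtg w (hfa w hw)) ⟨h1, h2, p, hp', hnw, htp⟩
        have hsc' : ∀ v ∈ alc ++ nuevos, v ∉ nuevos → pvScanned g nts nt bloq (alc ++ nuevos) v := by
          intro v hv hvn
          rcases List.mem_append.mp hv with h' | h'
          · by_cases hvf : v ∈ v0 :: vs
            · exact hscan v hvf
            · exact pvScanned_mono g nts nt bloq alc _ hasub v (hsc v h' hvf)
          · exact absurd h' hvn
        have hmeas : 2 * pvCnt nts (alc ++ nuevos) + (if (nuevos : List String).isEmpty then 0 else 1) < n := by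
          cases nuevos with
          | nil =>
            simp at hle ⊢
            omega
          | cons a add' =>
            have ha := hp a (by simp)
            have : pvCnt nts (alc ++ a :: add') < pvCnt nts alc := by
              apply pvCnt_strict nts alc _ a ha.1 ha.2.2.1
              · simp
              · exact hasub
            simp at hle ⊢
            omega
        exact ih _ hmeas (alc ++ nuevos) nuevos (le_refl _) hib (by simp [hia]) hrtg' (by intro v hv; simp [hv]) hsc'

theorem altB_iff (g : List (String × List String)) (nts : List String) (nt ini : String) (expl : List String) : es_alcanzable_alt g nts nt ini expl = true ↔ pvReach g nts nt expl ini := by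
  rw [es_alcanzable_alt]
  by_cases h1 : ini ∈ PySem.Set.ofList expl
  · have h1' : ini ∈ expl := (PySem.Set.mem_ofList _ _).mp h1
    simp [h1]
    intro hr
    exact pvReach_not_mem _ _ _ _ _ hr h1'
  · have h1' : ini ∉ expl := fun hc => h1 ((PySem.Set.mem_ofList _ _).mpr hc)
    simp only [h1, if_false]
    have hloop := altLoop_iff g nts (PySem.Set.ofList expl) nt ini
      (2 * pvCnt nts [ini] + 1) [ini] [ini] (by simp)
      h1 (by simp)
      (by intro v hv; simp at hv; subst hv; exact Relation.ReflTransGen.refl)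
      (by intro v hv; exact hv)
      (by intro v hv hnv; exact absurd hv hnv)
    rw [hloop]
    constructor
    · intro hr
      exact pvReach_mono g nts nt expl _ (fun x hx => (PySem.Set.mem_ofList _ _).mpr hx) ini hr
    · intro hr
      exact pvReach_mono g nts nt _ expl (fun x hx => (PySem.Set.mem_ofList _ _).mp hx) ini hr

-- ===== VERDICT (by name: the statement is the Claim_ definition above) =====
theorem es_alcanzable_spec : Claim_equal_es_alcanzable := by
  intro g nts nt ini expl _dom
  unfold Spec_es_alcanzable
  have hA := esA_true_iff g nts nt (3 * pvCnt nts expl + (if ini ∈ nts then 2 else 4)) expl ini (le_refl _)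
  have hB := altB_iff g nts nt ini expl
  have : es_alcanzable g nts nt ini expl = true ↔ es_alcanzable_alt g nts nt ini expl = true := hA.trans hB.symm
  cases hx : es_alcanzable g nts nt ini expl <;> cases hy : es_alcanzable_alt g nts nt ini expl <;> simp_all
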